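-- pv_equiv track=rewrite | github.com/joelouismarino/variational_rl | config/get_n_input.py | calculate_n_inputs
-- ===== SOURCE A (Python) =====
-- def calculate_n_inputs(inputs, config_dict):
--     """
--     Calculate the number of inputs for a particular model.
--     """
--     input_size = 0
--     for input_name in inputs:
--         if input_name == 'action':
--             input_size += config_dict['prior_args']['n_variables']
--         elif input_name == 'state':
--             input_size += config_dict['misc_args']['state_size']
--         elif input_name == 'reward':
--             input_size += 1
--         elif input_name in ['params', 'grads']:
--             input_size += 2 * config_dict['prior_args']['n_variables']
--     return input_size
-- ===== SOURCE B (Python) =====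
-- def calculate_n_inputs(inputs, config_dict):
--     """
--     Calculate the number of inputs for a particular model.
--     """
--     counts = {}
--     for name in inputs:
--         counts[name] = counts.get(name, 0) + 1
--     total = counts.get('reward', 0)
--     k = counts.get('action', 0) + 2 * (counts.get('params', 0) + counts.get('grads', 0))
--     if k:
--         total += k * config_dict['prior_args']['n_variables']
--     if counts.get('state', 0):
--         total += counts.get('state', 0) * config_dict['misc_args']['state_size']
--     return total
-- ===== Notes on version B (the rewrite author's own statement) =====
-- stated objective: alternative
-- what changed: B replaces A's per-element if/elif accumulation by building a dict of name counts in one pass and returning a closed-form arithmetic combination of the counts, reading each config key at most once and only when its count is nonzero.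
import Mathlib
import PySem

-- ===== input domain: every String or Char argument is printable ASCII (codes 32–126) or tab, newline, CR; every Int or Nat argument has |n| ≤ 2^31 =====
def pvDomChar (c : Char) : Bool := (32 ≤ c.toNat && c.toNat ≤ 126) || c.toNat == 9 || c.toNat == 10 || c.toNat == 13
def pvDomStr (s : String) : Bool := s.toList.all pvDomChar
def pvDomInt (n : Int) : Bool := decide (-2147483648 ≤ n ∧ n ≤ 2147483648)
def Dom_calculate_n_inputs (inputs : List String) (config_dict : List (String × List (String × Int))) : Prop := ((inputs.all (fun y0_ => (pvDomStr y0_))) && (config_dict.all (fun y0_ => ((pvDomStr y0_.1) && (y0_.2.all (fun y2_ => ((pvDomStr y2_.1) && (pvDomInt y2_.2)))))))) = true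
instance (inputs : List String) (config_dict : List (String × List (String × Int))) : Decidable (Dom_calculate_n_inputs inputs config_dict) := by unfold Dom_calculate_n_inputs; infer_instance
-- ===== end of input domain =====

-- B builds a dict of name counts in one pass and returns a closed-form combination of the counts
-- (alternative decomposition; config keys are read only when their count is nonzero, like A's lazy reads).


-- shared helper: config_dict[k1][k2] as an Option (none = KeyError in Python)
def pvCfg? (config_dict : List (String × List (String × Int))) (k1 k2 : String) : Option Int :=
  match (PySem.Dict.mk config_dict).get? k1 with
  | none => none
  | some inner => (PySem.Dict.mk inner).get? k2

-- ===== PORT A =====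
def calculate_n_inputs (inputs : List String) (config_dict : List (String × List (String × Int))) : Int :=
  inputs.foldl (fun input_size input_name =>
    if input_name = "action" then
      input_size + (pvCfg? config_dict "prior_args" "n_variables").getD 0
    else if input_name = "state" then
      input_size + (pvCfg? config_dict "misc_args" "state_size").getD 0
    else if input_name = "reward" then
      input_size + 1
    else if input_name = "params" ∨ input_name = "grads" then
      input_size + 2 * (pvCfg? config_dict "prior_args" "n_variables").getD 0
    else input_size) 0

-- ===== PORT B =====
def calculate_n_inputs_alt (inputs : List String) (config_dict : List (String × List (String × Int))) : Int :=
  let counts := inputs.foldl (fun d x => d.insert x (d.getD x 0 + 1)) (PySem.Dict.empty : PySem.Dict String Int)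
  let total := counts.getD "reward" 0
  let k := counts.getD "action" 0 + 2 * (counts.getD "params" 0 + counts.getD "grads" 0)
  let total := if k ≠ 0 then total + k * (pvCfg? config_dict "prior_args" "n_variables").getD 0 else total
  let total := if counts.getD "state" 0 ≠ 0 then
      total + counts.getD "state" 0 * (pvCfg? config_dict "misc_args" "state_size").getD 0
    else total
  total

-- ===== PRECONDITION & SPEC =====
-- Pre_ excludes exactly the inputs on which Python A raises KeyError: an input name that
-- needs config_dict['prior_args']['n_variables'] (resp. ['misc_args']['state_size']) while that
-- nested key is absent.  B raises on exactly the same inputs.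
def Pre_calculate_n_inputs (inputs : List String) (config_dict : List (String × List (String × Int))) : Prop :=
  (("action" ∈ inputs ∨ "params" ∈ inputs ∨ "grads" ∈ inputs) →
      (pvCfg? config_dict "prior_args" "n_variables").isSome) ∧
  ("state" ∈ inputs → (pvCfg? config_dict "misc_args" "state_size").isSome)
instance (inputs : List String) (config_dict : List (String × List (String × Int))) : Decidable (Pre_calculate_n_inputs inputs config_dict) := by unfold Pre_calculate_n_inputs; infer_instance

def pvWitness_calculate_n_inputs : List String × (List (String × List (String × Int))) :=
  (["action", "reward", "state"],
   [("prior_args", [("n_variables", 3)]), ("misc_args", [("state_size", 2)])])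

def Spec_calculate_n_inputs (inputs : List String) (config_dict : List (String × List (String × Int))) (out : Int) : Prop := out = calculate_n_inputs_alt inputs config_dict
instance (inputs : List String) (config_dict : List (String × List (String × Int))) (out : Int) : Decidable (Spec_calculate_n_inputs inputs config_dict out) := by unfold Spec_calculate_n_inputs; infer_instance

-- ===== CLAIM (what is proved, stated in full; the proofs are below) =====
def Claim_equal_calculate_n_inputs : Prop := ∀ (inputs : List String) (config_dict : List (String × List (String × Int))), Dom_calculate_n_inputs inputs config_dict → Pre_calculate_n_inputs inputs config_dict → Spec_calculate_n_inputs inputs config_dict (calculate_n_inputs inputs config_dict)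

-- ===== LEMMAS AND PROOFS =====

-- A's fold computes the count-weighted closed form (proved with the accumulator generalized).
theorem foldA_closed (config_dict : List (String × List (String × Int)))
    (l : List String) (acc : Int) :
    l.foldl (fun input_size input_name =>
      if input_name = "action" then
        input_size + (pvCfg? config_dict "prior_args" "n_variables").getD 0
      else if input_name = "state" then
        input_size + (pvCfg? config_dict "misc_args" "state_size").getD 0
      else if input_name = "reward" then
        input_size + 1
      else if input_name = "params" ∨ input_name = "grads" then
        input_size + 2 * (pvCfg? config_dict "prior_args" "n_variables").getD 0
      else input_size) acc
    = acc
      + (l.count "action") * (pvCfg? config_dict "prior_args" "n_variables").getD 0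
      + (l.count "state") * (pvCfg? config_dict "misc_args" "state_size").getD 0
      + (l.count "reward")
      + ((l.count "params" : Int) + l.count "grads") * (2 * (pvCfg? config_dict "prior_args" "n_variables").getD 0) := by
  induction l generalizing acc with
  | nil => simp
  | cons x xs ih =>
    simp only [List.foldl_cons, List.count_cons, ih]
    by_cases h1 : x = "action" <;> by_cases h2 : x = "state" <;>
      by_cases h3 : x = "reward" <;> by_cases h4 : x = "params" <;> by_cases h5 : x = "grads" <;>
      simp_all <;> ring

-- pure arithmetic: the closed form equals B's guarded accumulation
theorem closed_eq_guarded (na ns nr np ng nv ss : Int)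
    (h1 : 0 ≤ na) (h2 : 0 ≤ np) (h3 : 0 ≤ ng) :
    na * nv + ns * ss + nr + (np + ng) * (2 * nv) =
      (if ns ≠ 0 then
        (if na + 2 * (np + ng) ≠ 0 then nr + (na + 2 * (np + ng)) * nv else nr) + ns * ss
       else
        (if na + 2 * (np + ng) ≠ 0 then nr + (na + 2 * (np + ng)) * nv else nr)) := by
  have key : ¬ (na + 2 * (np + ng) ≠ 0) → na = 0 ∧ np = 0 ∧ ng = 0 := by omega
  split_ifs with hs hk hk
  · ring
  · obtain ⟨ea, ep, eg⟩ := key hk; rw [ea, ep, eg]; ring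
  · have es : ns = 0 := by omega
    rw [es]; ring
  · obtain ⟨ea, ep, eg⟩ := key hk
    have es : ns = 0 := by omega
    rw [ea, ep, eg, es]; ring

theorem calculate_n_inputs_spec : Claim_equal_calculate_n_inputs := by
  intro inputs config_dict _ _
  show calculate_n_inputs inputs config_dict = calculate_n_inputs_alt inputs config_dict
  unfold calculate_n_inputs calculate_n_inputs_alt
  rw [foldA_closed]
  simp only [PySem.Dict.getD_foldl_insert_add_one, PySem.Dict.getD_empty, zero_add]
  exact closed_eq_guarded _ _ _ _ _ _ _ (by positivity) (by positivity) (by positivity)
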